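-- pv_equiv track=rewrite | github.com/NicolasTO2020/aps_onibus_credito_carbono | projeto_aps.py | Valor_Credito_A_Receber
-- ===== SOURCE A (Python) =====
-- def Valor_Credito_A_Receber(emissao_Total_dia):
--     credito = 0
--     emissao_Total_dia *= 365
--     while True:
--         if emissao_Total_dia >= 1000:
--             emissao_Total_dia -= 1000
--             credito += 1
--         elif emissao_Total_dia < 1000:
--             credito_Ano = credito * 365 # creditos a receber no período de 1 ano
--             break
--     return credito_Ano
-- ===== SOURCE B (Python) =====
-- def Valor_Credito_A_Receber(emissao_Total_dia):
--     emissao_ano = emissao_Total_dia * 365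
--     credito = max(emissao_ano, 0) // 1000
--     return credito * 365
-- ===== Notes on version B (the rewrite author's own statement) =====
-- stated objective: faster
-- what changed: replaces the subtract-1000-in-a-loop counting with a closed-form integer division (clamped at 0, matching A's zero credits for sub-threshold or negative emission)
import Mathlib
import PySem

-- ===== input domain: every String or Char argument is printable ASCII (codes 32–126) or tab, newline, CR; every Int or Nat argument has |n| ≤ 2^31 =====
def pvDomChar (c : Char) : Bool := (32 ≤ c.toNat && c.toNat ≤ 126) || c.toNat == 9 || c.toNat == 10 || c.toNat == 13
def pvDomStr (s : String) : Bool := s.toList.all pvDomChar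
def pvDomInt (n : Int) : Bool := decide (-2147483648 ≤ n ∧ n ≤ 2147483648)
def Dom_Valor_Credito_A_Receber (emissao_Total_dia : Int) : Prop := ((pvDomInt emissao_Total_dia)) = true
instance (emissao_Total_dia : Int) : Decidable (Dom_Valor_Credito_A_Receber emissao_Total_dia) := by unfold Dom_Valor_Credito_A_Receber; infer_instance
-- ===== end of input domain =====

-- B replaces A's subtract-1000 counting loop with a closed-form integer division (objective: faster, asymptotic).

-- ===== PORT A =====
-- A's `while True` loop: subtract 1000 and count while the remaining yearly emission is ≥ 1000.
def pvLoopA (emissao credito : Int) : Int :=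
  if emissao ≥ 1000 then pvLoopA (emissao - 1000) (credito + 1)
  else credito * 365
termination_by emissao.toNat
decreasing_by omega

def Valor_Credito_A_Receber (emissao_Total_dia : Int) : Int :=
  pvLoopA (emissao_Total_dia * 365) 0

-- ===== PORT B =====
def Valor_Credito_A_Receber_alt (emissao_Total_dia : Int) : Int :=
  let emissao_ano := emissao_Total_dia * 365
  let credito := PySem.Int.floordiv (max emissao_ano 0) 1000
  credito * 365

-- ===== PRECONDITION & SPEC =====
def Spec_Valor_Credito_A_Receber (emissao_Total_dia : Int) (out : Int) : Prop := out = Valor_Credito_A_Receber_alt emissao_Total_dia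
instance (emissao_Total_dia : Int) (out : Int) : Decidable (Spec_Valor_Credito_A_Receber emissao_Total_dia out) := by unfold Spec_Valor_Credito_A_Receber; infer_instance

-- ===== CLAIM (what is proved, stated in full; the proofs are below) =====
def Claim_equal_Valor_Credito_A_Receber : Prop := ∀ (emissao_Total_dia : Int), Dom_Valor_Credito_A_Receber emissao_Total_dia → Spec_Valor_Credito_A_Receber emissao_Total_dia (Valor_Credito_A_Receber emissao_Total_dia)

-- ===== LEMMAS AND PROOFS =====
theorem pvLoopA_eq (emissao credito : Int) :
    pvLoopA emissao credito = (credito + (max emissao 0) / 1000) * 365 := by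
  fun_induction pvLoopA emissao credito with
  | case1 e c h ih =>
      rw [ih]
      have hmax : max (e - 1000) 0 = e - 1000 := by omega
      have hmax' : max e 0 = e := by omega
      rw [hmax, hmax']
      have : (e - 1000) / 1000 = e / 1000 - 1 := by omega
      rw [this]; ring
  | case2 e c h =>
      have : max e 0 / 1000 = 0 := by omega
      rw [this]; ring

-- ===== VERDICT (by name: the statement is the Claim_ definition above) =====
theorem Valor_Credito_A_Receber_spec : Claim_equal_Valor_Credito_A_Receber := by
  intro e _
  unfold Spec_Valor_Credito_A_Receber Valor_Credito_A_Receber Valor_Credito_A_Receber_alt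
  rw [pvLoopA_eq]
  simp only []
  rw [PySem.Int.floordiv_eq_ediv_of_pos (by norm_num : (0:Int) < 1000)]
  ring
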